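-- pv_equiv track=rewrite | github.com/da-in/algorithm-study | Warming Up/마법의 엘리베이터/hyuksoon.py | solution
-- ===== SOURCE A (Python) =====
-- def solution(storey):
--     answer = 0
--     num=[int(i) for i in reversed(str(storey))]
--     num+=[0]
--     for i in range(len(num)-1):
--         if num[i]>5 or (num[i]==5 and num[i+1]>=5):
--             answer+=10-num[i]
--             num[i+1]+=1
--         else:
--             answer+=num[i]
--     answer+=num[-1]
--     return answer
-- ===== SOURCE B (Python) =====
-- def solution(storey):
--     # digit-by-digit recursion; carry threaded as rest+1 instead of mutating a digit array
--     if storey <= 0: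
--         return 0
--     d, rest = storey % 10, storey // 10
--     if d < 5:
--         return d + solution(rest)
--     if d > 5:
--         return (10 - d) + solution(rest + 1)
--     return 5 + solution(rest + 1) if rest % 10 >= 5 else 5 + solution(rest)
-- ===== Notes on version B (the rewrite author's own statement) =====
-- stated objective: simpler
-- what changed: B replaces A's string conversion, digit array and index loop with carry written into the next array slot by a direct arithmetic recursion peeling one digit at a time via modulus and floor division, threading the carry into the recursive argument instead of mutating the array.
import Mathlib
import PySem

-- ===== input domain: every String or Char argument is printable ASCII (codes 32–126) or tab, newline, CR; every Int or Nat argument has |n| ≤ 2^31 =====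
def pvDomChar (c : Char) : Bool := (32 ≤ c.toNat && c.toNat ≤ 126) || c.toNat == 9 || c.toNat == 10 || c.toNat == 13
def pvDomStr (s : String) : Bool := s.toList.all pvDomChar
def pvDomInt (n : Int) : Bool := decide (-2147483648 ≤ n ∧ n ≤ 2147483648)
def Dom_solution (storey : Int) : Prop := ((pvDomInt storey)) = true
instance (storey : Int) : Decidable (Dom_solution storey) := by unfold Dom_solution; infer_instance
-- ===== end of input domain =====

-- B is a digit-by-digit arithmetic recursion instead of A's string/array loop; equivalence is
-- proved for all non-negative storey (A raises ValueError on negatives, excluded by Pre_).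

-- ===== PORT A =====
-- one loop iteration of A: reads num[i], num[i+1], may increment num[i+1]
def pvStep (st : Int × List Int) (i : Int) : Int × List Int :=
  let answer := st.1
  let num := st.2
  if PySem.List.pyGetD num i 0 > 5 ∨
      (PySem.List.pyGetD num i 0 = 5 ∧ PySem.List.pyGetD num (i + 1) 0 ≥ 5) then
    (answer + (10 - PySem.List.pyGetD num i 0),
     num.set (i + 1).toNat (PySem.List.pyGetD num (i + 1) 0 + 1))
  else
    (answer + PySem.List.pyGetD num i 0, num)

def solution (storey : Int) : Int :=
  let num : List Int :=
    ((PySem.Int.toChars storey).reverse.map (fun c => (PySem.Int.ofChars? [c]).getD 0)) ++ [0]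
  let res := (PySem.List.pyRange 0 ((num.length : Int) - 1) 1).foldl pvStep (0, num)
  res.1 + (PySem.List.pyGet? res.2 (-1)).getD 0

-- ===== PORT B =====
-- B's recursion, with a fuel argument (≥ storey.toNat) only to make the structural recursion total
def pvAltGo : Nat → Int → Int
  | 0, _ => 0
  | fuel + 1, s =>
    if s ≤ 0 then 0
    else
      let d := PySem.Int.mod s 10
      let rest := PySem.Int.floordiv s 10
      if d < 5 then d + pvAltGo fuel rest
      else if d > 5 then (10 - d) + pvAltGo fuel (rest + 1)
      else if PySem.Int.mod rest 10 ≥ 5 then 5 + pvAltGo fuel (rest + 1)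
      else 5 + pvAltGo fuel rest

def solution_alt (storey : Int) : Int := pvAltGo storey.toNat storey

-- ===== PRECONDITION & SPEC =====
-- Pre_ excludes negative storey: A raises ValueError there (int('-') on the sign character).
def Pre_solution (storey : Int) : Prop := 0 ≤ storey
instance (storey : Int) : Decidable (Pre_solution storey) := by unfold Pre_solution; infer_instance
def pvWitness_solution : Int := 2554

def Spec_solution (storey : Int) (out : Int) : Prop := out = solution_alt storey
instance (storey : Int) (out : Int) : Decidable (Spec_solution storey out) := by unfold Spec_solution; infer_instance

-- ===== CLAIM (what is proved, stated in full; the proofs are below) =====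
def Claim_equal_solution : Prop := ∀ (storey : Int), Dom_solution storey → Pre_solution storey → Spec_solution storey (solution storey)

-- ===== LEMMAS AND PROOFS =====

-- little-endian decimal digits, mirroring Nat.toDigitsCore's emission order
def pvDigits (n : Nat) : List Int :=
  ((n % 10 : Nat) : Int) :: (if h : n / 10 = 0 then [] else pvDigits (n / 10))
termination_by n
decreasing_by exact Nat.div_lt_self (by omega) (by omega)

-- value of a single digit character under A's int(i)
def pvDval (c : Char) : Int := (PySem.Int.ofChars? [c]).getD 0

lemma pvDval_digitChar (d : Nat) (hd : d < 10) : pvDval (Nat.digitChar d) = (d : Int) := by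
  interval_cases d <;> decide

lemma toDigitsCore_rev (fuel : Nat) : ∀ (n : Nat) (ds : List Char), n < fuel →
    (Nat.toDigitsCore 10 fuel n ds).reverse.map pvDval = ds.reverse.map pvDval ++ pvDigits n := by
  induction fuel with
  | zero => intro n ds h; omega
  | succ f ih =>
    intro n ds h
    rw [Nat.toDigitsCore]
    by_cases h0 : n / 10 = 0
    · rw [if_pos h0, pvDigits]
      rw [dif_pos h0]
      simp [pvDval_digitChar (n % 10) (by omega)]
    · rw [if_neg h0, pvDigits, dif_neg h0]
      rw [ih (n / 10) _ (by omega)]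
      simp [pvDval_digitChar (n % 10) (by omega)]

lemma digits_of_nat (m : Nat) :
    ((PySem.Int.toChars (m : Int)).reverse.map (fun c => (PySem.Int.ofChars? [c]).getD 0))
      = pvDigits m := by
  have h1 : PySem.Int.toChars (m : Int) = Nat.toDigits 10 m := by
    simp [PySem.Int.toChars]
  rw [h1, Nat.toDigits]
  have := toDigitsCore_rev (m + 1) m [] (by omega)
  simpa [pvDval] using this

-- pure recursion computing (answer contribution, outgoing carry) of A's loop
def pvF2 : List Int → Int → Int × Int
  | [], c => (0, c)
  | d :: ds, c =>
      if d + c > 5 ∨ (d + c = 5 ∧ ds.headD 0 ≥ 5) then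
        (10 - (d + c) + (pvF2 ds 1).1, (pvF2 ds 1).2)
      else
        (d + c + (pvF2 ds 0).1, (pvF2 ds 0).2)

lemma pvF2_nil (c : Int) : pvF2 [] c = (0, c) := rfl

lemma pvF2_cons (d : Int) (ds : List Int) (c : Int) :
    pvF2 (d :: ds) c =
      if d + c > 5 ∨ (d + c = 5 ∧ ds.headD 0 ≥ 5) then
        (10 - (d + c) + (pvF2 ds 1).1, (pvF2 ds 1).2)
      else
        (d + c + (pvF2 ds 0).1, (pvF2 ds 0).2) := rfl

-- add the carry to the head of the remaining suffix
def pvAddHead (c : Int) : List Int → List Int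
  | [] => []
  | x :: t => (x + c) :: t

lemma pyGetD_append_len (pre l2 : List Int) :
    PySem.List.pyGetD (pre ++ l2) (pre.length : Int) 0 = l2.headD 0 := by
  rw [PySem.List.pyGetD_of_nonneg _ _ (by positivity)]
  simp only [Int.toNat_natCast, List.getD]
  cases l2 <;> simp

lemma pyGetD_append_len1 (pre l2 : List Int) :
    PySem.List.pyGetD (pre ++ l2) ((pre.length : Int) + 1) 0 = l2.tail.headD 0 := by
  rw [PySem.List.pyGetD_of_nonneg _ _ (by positivity)]
  have h1 : ((pre.length : Int) + 1).toNat = pre.length + 1 := by omega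
  rw [h1]
  cases l2 with
  | nil => simp [List.getD]
  | cons x t => cases t <;> simp [List.getD]

lemma set_append_len (pre l2 : List Int) (v : Int) :
    (pre ++ l2).set pre.length v = pre ++ l2.set 0 v := by
  simpa using List.set_append_right (s := pre) (t := l2) pre.length v (le_refl _)

lemma loop_lemma : ∀ (ds pre : List Int) (c a : Int),
    ∃ mid : List Int,
      (PySem.List.pyRange (pre.length : Int) ((pre.length : Int) + ds.length) 1).foldl pvStep
          (a, pre ++ pvAddHead c (ds ++ [0]))
        = (a + (pvF2 ds c).1, pre ++ mid ++ [(pvF2 ds c).2]) ∧ mid.length = ds.length := by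
  intro ds
  induction ds with
  | nil =>
    intro pre c a
    refine ⟨[], ?_, rfl⟩
    have h0 : PySem.List.pyRange (pre.length : Int) ((pre.length : Int) + 0) 1 = [] := by
      simp [PySem.List.pyRange]
    simp [pvAddHead, pvF2_nil]
  | cons d ds ih =>
    intro pre c a
    have hcons : PySem.List.pyRange (pre.length : Int) ((pre.length : Int) + (d :: ds).length) 1
        = (pre.length : Int) :: PySem.List.pyRange ((pre.length : Int) + 1) ((pre.length : Int) + (d :: ds).length) 1 := by
      apply PySem.List.pyRange_one_cons
      simp only [List.length_cons]
      push_cast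
      omega
    rw [hcons, List.foldl_cons]
    have hnum : pre ++ pvAddHead c ((d :: ds) ++ [0]) = pre ++ (d + c) :: (ds ++ [0]) := by
      simp [pvAddHead]
    rw [hnum]
    have hget0 : PySem.List.pyGetD (pre ++ (d + c) :: (ds ++ [0])) (pre.length : Int) 0 = d + c := by
      rw [pyGetD_append_len]; rfl
    have hget1 : PySem.List.pyGetD (pre ++ (d + c) :: (ds ++ [0])) ((pre.length : Int) + 1) 0 = ds.headD 0 := by
      rw [pyGetD_append_len1]
      cases ds <;> simp
    by_cases hcond : d + c > 5 ∨ (d + c = 5 ∧ ds.headD 0 ≥ 5)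
    · have hstep : pvStep (a, pre ++ (d + c) :: (ds ++ [0])) (pre.length : Int)
          = (a + (10 - (d + c)), (pre ++ [d + c]) ++ pvAddHead 1 (ds ++ [0])) := by
        simp only [pvStep, hget0, hget1]
        rw [if_pos hcond]
        have hidx : ((pre.length : Int) + 1).toNat = (pre ++ [d + c]).length := by
          simp only [List.length_append, List.length_cons, List.length_nil]
          omega
        have hsplit : pre ++ (d + c) :: (ds ++ [0]) = (pre ++ [d + c]) ++ (ds ++ [0]) := by simp
        rw [hsplit, hidx, set_append_len]
        have htail : (ds ++ [0]).set 0 (ds.headD 0 + 1) = pvAddHead 1 (ds ++ [0]) := by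
          cases ds <;> simp [pvAddHead]
        rw [htail]
      rw [hstep]
      obtain ⟨mid, hmid, hlen⟩ := ih (pre ++ [d + c]) 1 (a + (10 - (d + c)))
      refine ⟨(d + c) :: mid, ?_, by simp [hlen]⟩
      have hrange : PySem.List.pyRange ((pre.length : Int) + 1) ((pre.length : Int) + ((d :: ds).length : Int)) 1
          = PySem.List.pyRange (((pre ++ [d + c]).length : Int)) (((pre ++ [d + c]).length : Int) + (ds.length : Int)) 1 := by
        congr 1 <;> (simp only [List.length_append, List.length_cons, List.length_nil]; push_cast; ring)
      rw [hrange, hmid]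
      rw [pvF2_cons, if_pos hcond]
      simp only [Prod.mk.injEq]
      exact ⟨by ring, by simp⟩
    · have hstep : pvStep (a, pre ++ (d + c) :: (ds ++ [0])) (pre.length : Int)
          = (a + (d + c), (pre ++ [d + c]) ++ pvAddHead 0 (ds ++ [0])) := by
        simp only [pvStep, hget0, hget1]
        rw [if_neg hcond]
        have htail : pre ++ (d + c) :: (ds ++ [0]) = (pre ++ [d + c]) ++ pvAddHead 0 (ds ++ [0]) := by
          cases ds <;> simp [pvAddHead]
        rw [htail]
      rw [hstep]
      obtain ⟨mid, hmid, hlen⟩ := ih (pre ++ [d + c]) 0 (a + (d + c))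
      refine ⟨(d + c) :: mid, ?_, by simp [hlen]⟩
      have hrange : PySem.List.pyRange ((pre.length : Int) + 1) ((pre.length : Int) + ((d :: ds).length : Int)) 1
          = PySem.List.pyRange (((pre ++ [d + c]).length : Int)) (((pre ++ [d + c]).length : Int) + (ds.length : Int)) 1 := by
        congr 1 <;> (simp only [List.length_append, List.length_cons, List.length_nil]; push_cast; ring)
      rw [hrange, hmid]
      rw [pvF2_cons, if_neg hcond]
      simp only [Prod.mk.injEq]
      exact ⟨by ring, by simp⟩

lemma pyGet_neg_one_last (mid : List Int) (v : Int) :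
    (PySem.List.pyGet? (mid ++ [v]) (-1)).getD 0 = v := by
  simp [PySem.List.pyGet?, PySem.List.pyIdx?]

-- A as the pure recursion pvF2 over the digit list
lemma solution_eq_f2 (m : Nat) :
    solution (m : Int) = (pvF2 (pvDigits m) 0).1 + (pvF2 (pvDigits m) 0).2 := by
  simp only [solution]
  rw [digits_of_nat]
  have hne : pvDigits m ≠ [] := by rw [pvDigits]; simp
  have hAdd : pvDigits m ++ [0] = pvAddHead 0 (pvDigits m ++ [0]) := by
    cases h : pvDigits m with
    | nil => exact absurd h hne
    | cons x t => simp [pvAddHead]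
  have hlen : (((pvDigits m ++ [0]).length : Int) - 1) = ((([] : List Int).length : Int) + ((pvDigits m).length : Int)) := by
    simp
  obtain ⟨mid, hmid, _⟩ := loop_lemma (pvDigits m) [] 0 0
  rw [hlen, hAdd]
  simp only [List.nil_append] at hmid
  rw [show ((([] : List Int).length : Int)) = (0 : Int) by simp] at hmid
  rw [show ((([] : List Int).length : Int)) = (0 : Int) by simp]
  rw [hmid]
  rw [pyGet_neg_one_last]
  ring

-- pvDigits of a number below 10 / of a larger number, in arithmetic form
lemma pvDigits_small (n : Nat) (h : n < 10) : pvDigits n = [(n : Int)] := by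
  rw [pvDigits, dif_pos (by omega : n / 10 = 0)]
  congr 1
  omega

lemma pvDigits_large (n : Nat) (h : 10 ≤ n) : pvDigits n = ((n % 10 : Nat) : Int) :: pvDigits (n / 10) := by
  rw [pvDigits, dif_neg (by omega : ¬ n / 10 = 0)]

lemma head_pvDigits (n : Nat) : (pvDigits n).headD 0 = ((n % 10 : Nat) : Int) := by
  rw [pvDigits]
  rfl

-- bounds used to show the fuel is irrelevant once it dominates storey
lemma pvDecPlain {s : Int} (h : ¬ s ≤ 0) : (PySem.Int.floordiv s 10).toNat < s.toNat := by
  have hf : PySem.Int.floordiv s 10 = s / 10 := PySem.Int.floordiv_eq_ediv_of_pos (by omega)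
  omega

lemma pvDecCarry {s : Int} (h : ¬ s ≤ 0) (h5 : ¬ PySem.Int.mod s 10 < 5) :
    (PySem.Int.floordiv s 10 + 1).toNat < s.toNat := by
  have hf : PySem.Int.floordiv s 10 = s / 10 := PySem.Int.floordiv_eq_ediv_of_pos (by omega)
  have hm : PySem.Int.mod s 10 = s % 10 := PySem.Int.mod_eq_emod_of_pos (by omega)
  omega

lemma go_congr : ∀ (f f' : Nat) (s : Int), s.toNat ≤ f → s.toNat ≤ f' → pvAltGo f s = pvAltGo f' s := by
  intro f
  induction f with
  | zero =>
    intro f' s h h'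
    have hs : s ≤ 0 := by omega
    cases f' with
    | zero => rfl
    | succ g' => simp [pvAltGo, hs]
  | succ g ih =>
    intro f' s h h'
    cases f' with
    | zero =>
      have hs : s ≤ 0 := by omega
      simp [pvAltGo, hs]
    | succ g' =>
      by_cases hs : s ≤ 0
      · simp [pvAltGo, hs]
      · simp only [pvAltGo, if_neg hs]
        have h1 := pvDecPlain hs
        by_cases h5 : PySem.Int.mod s 10 < 5
        · rw [if_pos h5, if_pos h5, ih g' _ (by omega) (by omega)]
        · have h2 := pvDecCarry hs h5
          rw [if_neg h5, if_neg h5]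
          by_cases h6 : PySem.Int.mod s 10 > 5
          · rw [if_pos h6, if_pos h6, ih g' _ (by omega) (by omega)]
          · rw [if_neg h6, if_neg h6]
            by_cases h7 : PySem.Int.mod (PySem.Int.floordiv s 10) 10 ≥ 5
            · rw [if_pos h7, if_pos h7, ih g' _ (by omega) (by omega)]
            · rw [if_neg h7, if_neg h7, ih g' _ (by omega) (by omega)]

lemma alt_unfold (s : Int) : solution_alt s =
    if s ≤ 0 then 0
    else
      if PySem.Int.mod s 10 < 5 then PySem.Int.mod s 10 + solution_alt (PySem.Int.floordiv s 10)
      else if PySem.Int.mod s 10 > 5 then (10 - PySem.Int.mod s 10) + solution_alt (PySem.Int.floordiv s 10 + 1)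
      else if PySem.Int.mod (PySem.Int.floordiv s 10) 10 ≥ 5 then 5 + solution_alt (PySem.Int.floordiv s 10 + 1)
      else 5 + solution_alt (PySem.Int.floordiv s 10) := by
  unfold solution_alt
  by_cases hs : s ≤ 0
  · have ht : s.toNat = 0 := by omega
    rw [ht, if_pos hs]
    rfl
  · obtain ⟨t, ht⟩ : ∃ t, s.toNat = t + 1 := ⟨s.toNat - 1, by omega⟩
    rw [ht, if_neg hs]
    have h1 := pvDecPlain hs
    simp only [pvAltGo, if_neg hs]
    by_cases h5 : PySem.Int.mod s 10 < 5
    · rw [if_pos h5, if_pos h5, go_congr t _ _ (by omega) (le_refl _)]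
    · have h2 := pvDecCarry hs h5
      rw [if_neg h5, if_neg h5]
      by_cases h6 : PySem.Int.mod s 10 > 5
      · rw [if_pos h6, if_pos h6, go_congr t _ _ (by omega) (le_refl _)]
      · rw [if_neg h6, if_neg h6]
        by_cases h7 : PySem.Int.mod (PySem.Int.floordiv s 10) 10 ≥ 5
        · rw [if_pos h7, if_pos h7, go_congr t _ _ (by omega) (le_refl _)]
        · rw [if_neg h7, if_neg h7, go_congr t _ _ (by omega) (le_refl _)]

lemma alt_zero : solution_alt 0 = 0 := by
  rw [alt_unfold]
  norm_num

lemma alt_one : solution_alt 1 = 1 := by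
  rw [alt_unfold]
  have h1 : PySem.Int.mod 1 10 = 1 := by decide
  have h2 : PySem.Int.floordiv 1 10 = 0 := by decide
  rw [h1, h2]
  norm_num [alt_zero]

lemma bridge (n : Nat) : ∀ c : Int, (c = 0 ∨ c = 1) →
    (pvF2 (pvDigits n) c).1 + (pvF2 (pvDigits n) c).2 = solution_alt ((n : Int) + c) := by
  induction n using Nat.strong_induction_on with
  | _ n ih =>
  intro c hc
  have hc0 : (0 : Int) ≤ c ∧ c ≤ 1 := by rcases hc with rfl | rfl <;> norm_num
  have hmod : ∀ k : Int, 0 ≤ k → PySem.Int.mod k 10 = k % 10 := fun k _ =>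
    PySem.Int.mod_eq_emod_of_pos (by omega)
  have hdiv : ∀ k : Int, 0 ≤ k → PySem.Int.floordiv k 10 = k / 10 := fun k _ =>
    PySem.Int.floordiv_eq_ediv_of_pos (by omega)
  by_cases hn : n < 10
  · -- single digit
    rw [pvDigits_small n hn, pvF2_cons]
    simp only [List.headD_nil, pvF2_nil]
    by_cases hz : (n : Int) + c ≤ 0
    · -- n = 0, c = 0
      have hn0 : n = 0 := by omega
      have hc00 : c = 0 := by omega
      subst hn0; subst hc00
      rw [if_neg (by norm_num)]
      simpa using alt_zero.symm
    · rw [alt_unfold, if_neg hz]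
      rw [hmod _ (by omega), hdiv _ (by omega)]
      by_cases hx10 : (n : Int) + c = 10
      · -- n = 9, c = 1 : A emits 0 with carry; B sees digit 0, rest 1
        have hd : ((n : Int) + c) % 10 = 0 := by omega
        have hr : ((n : Int) + c) / 10 = 1 := by omega
        rw [hd, hr]
        rw [if_pos (show (n : Int) + c > 5 ∨ ((n : Int) + c = 5 ∧ (0:Int) ≥ 5) from Or.inl (by rcases hc with rfl | rfl <;> omega))]
        rw [if_pos (show (0:Int) < 5 by omega), alt_one]
        simp
        rcases hc with rfl | rfl <;> omega
      · have hd : ((n : Int) + c) % 10 = (n : Int) + c := by rcases hc with rfl | rfl <;> omega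
        have hr : ((n : Int) + c) / 10 = 0 := by rcases hc with rfl | rfl <;> omega
        rw [hd, hr]
        by_cases h5 : (n : Int) + c < 5
        · rw [if_pos h5, if_neg (show ¬ ((n : Int) + c > 5 ∨ ((n : Int) + c = 5 ∧ (0:Int) ≥ 5)) by omega), alt_zero]
          omega
        · by_cases h6 : (n : Int) + c > 5
          · rw [if_pos (show (n : Int) + c > 5 ∨ ((n : Int) + c = 5 ∧ (0:Int) ≥ 5) from Or.inl h6)]
            rw [if_neg (show ¬ ((n : Int) + c < 5) by omega), if_pos h6]
            rw [show ((0:Int) + 1) = 1 by norm_num, alt_one]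
            simp
          · have hx5 : (n : Int) + c = 5 := by omega
            rw [if_neg (show ¬ ((n : Int) + c > 5 ∨ ((n : Int) + c = 5 ∧ (0:Int) ≥ 5)) by omega)]
            rw [if_neg (show ¬ ((n : Int) + c < 5) by omega), if_neg (show ¬ ((n : Int) + c > 5) by omega)]
            rw [hmod _ (by omega)]
            rw [if_neg (show ¬ ((0:Int) % 10 ≥ 5) by omega)]
            rw [alt_zero]
            omega
  · -- n ≥ 10
    rw [pvDigits_large n (by omega), pvF2_cons, head_pvDigits]
    have hih0 := ih (n / 10) (by omega) 0 (Or.inl rfl)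
    have hih1 := ih (n / 10) (by omega) 1 (Or.inr rfl)
    rw [show (((n / 10 : Nat) : Int) + 0) = ((n / 10 : Nat) : Int) by ring] at hih0
    rw [alt_unfold (s := (n : Int) + c), if_neg (show ¬ ((n : Int) + c ≤ 0) by omega)]
    rw [hmod _ (by omega), hdiv _ (by omega)]
    by_cases hx10 : ((n % 10 : Nat) : Int) + c = 10
    · -- digit 9 with carry: A emits 0 and carries; B sees digit 0, rest+1
      have hd : ((n : Int) + c) % 10 = 0 := by rcases hc with rfl | rfl <;> omega
      have hr : ((n : Int) + c) / 10 = (n : Int) / 10 + 1 := by rcases hc with rfl | rfl <;> omega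
      rw [hd, hr]
      rw [if_pos (show ((n % 10 : Nat) : Int) + c > 5 ∨ (((n % 10 : Nat) : Int) + c = 5 ∧ ((n / 10 % 10 : Nat) : Int) ≥ 5) from Or.inl (by omega))]
      rw [if_pos (show (0:Int) < 5 by omega)]
      rw [show ((n : Int) / 10 + 1) = (((n / 10 : Nat) : Int) + 1) by push_cast; omega]
      rw [← hih1]
      omega
    · have hd : ((n : Int) + c) % 10 = ((n % 10 : Nat) : Int) + c := by omega
      have hr : ((n : Int) + c) / 10 = ((n / 10 : Nat) : Int) := by push_cast; omega
      rw [hd, hr]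
      by_cases hgt : ((n % 10 : Nat) : Int) + c > 5
      · rw [if_pos (show ((n % 10 : Nat) : Int) + c > 5 ∨ (((n % 10 : Nat) : Int) + c = 5 ∧ ((n / 10 % 10 : Nat) : Int) ≥ 5) from Or.inl hgt)]
        rw [if_neg (show ¬ (((n % 10 : Nat) : Int) + c < 5) by omega), if_pos hgt]
        rw [← hih1]
        omega
      · by_cases hlt : ((n % 10 : Nat) : Int) + c < 5
        · rw [if_neg (show ¬ (((n % 10 : Nat) : Int) + c > 5 ∨ (((n % 10 : Nat) : Int) + c = 5 ∧ ((n / 10 % 10 : Nat) : Int) ≥ 5)) by omega)]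
          rw [if_pos hlt]
          rw [← hih0]
          omega
        · -- digit exactly 5: both read the next raw digit
          have h5 : ((n % 10 : Nat) : Int) + c = 5 := by omega
          rw [if_neg (show ¬ (((n % 10 : Nat) : Int) + c < 5) by omega), if_neg (show ¬ (((n % 10 : Nat) : Int) + c > 5) by omega)]
          rw [hmod _ (by positivity)]
          have hnx : ((n / 10 : Nat) : Int) % 10 = ((n / 10 % 10 : Nat) : Int) := by push_cast; omega
          rw [hnx]
          by_cases hge : ((n / 10 % 10 : Nat) : Int) ≥ 5
          · rw [if_pos (show ((n % 10 : Nat) : Int) + c > 5 ∨ (((n % 10 : Nat) : Int) + c = 5 ∧ ((n / 10 % 10 : Nat) : Int) ≥ 5) from Or.inr ⟨h5, hge⟩)]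
            rw [if_pos hge]
            rw [← hih1]
            omega
          · rw [if_neg (show ¬ (((n % 10 : Nat) : Int) + c > 5 ∨ (((n % 10 : Nat) : Int) + c = 5 ∧ ((n / 10 % 10 : Nat) : Int) ≥ 5)) by tauto)]
            rw [if_neg hge]
            rw [← hih0]
            omega

-- ===== VERDICT (by name: the statement is the Claim_ definition above) =====
theorem solution_spec : Claim_equal_solution := by
  intro storey _ hpre
  unfold Spec_solution
  obtain ⟨m, rfl⟩ := Int.eq_ofNat_of_zero_le hpre
  rw [solution_eq_f2]
  have h := bridge m 0 (Or.inl rfl)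
  simpa using h
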